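-- pv_equiv track=rewrite | github.com/rajohnson/adventOfCode | 2021/day10/syntax.py | getCompletionScore
-- ===== SOURCE A (Python) =====
-- def getCompletionScore(line):
--     scores = {
--         ")": 1,
--         "]": 2,
--         "}": 3,
--         ">": 4,
--     }
--     score = 0
--     for c in line:
--         score *= 5
--         score += scores[c]
--     return score
-- ===== SOURCE B (Python) =====
-- def getCompletionScore(line):
--     scores = {
--         ")": 1,
--         "]": 2,
--         "}": 3,
--         ">": 4,
--     }
--     score = 0
--     weight = 1
--     for c in reversed(line):
--         score += scores[c] * weight
--         weight *= 5
--     return score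
-- ===== Notes on version B (the rewrite author's own statement) =====
-- stated objective: alternative
-- what changed: Replaces Horner accumulation (multiply score by 5 then add per char) with a right-to-left pass maintaining an explicit power-of-five weight and summing scores[c]*weight.
import Mathlib
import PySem

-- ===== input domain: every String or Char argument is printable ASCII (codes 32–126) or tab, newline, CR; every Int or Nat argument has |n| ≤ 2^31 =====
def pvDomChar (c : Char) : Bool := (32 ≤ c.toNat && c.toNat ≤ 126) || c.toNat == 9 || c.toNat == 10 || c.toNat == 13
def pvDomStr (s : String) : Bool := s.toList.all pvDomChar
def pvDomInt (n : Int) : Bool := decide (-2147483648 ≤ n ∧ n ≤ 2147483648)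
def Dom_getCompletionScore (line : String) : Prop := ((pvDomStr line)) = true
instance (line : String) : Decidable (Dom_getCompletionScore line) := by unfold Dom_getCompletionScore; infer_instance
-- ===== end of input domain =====

-- B replaces A's Horner accumulation with a reverse pass keeping an explicit power-of-five weight (alternative decomposition, same cost).


-- ===== PORT A =====
-- the scores dict as a lookup function; scores[c] raises KeyError on other chars (excluded by Pre_),
-- where this returns 0 — exact on every input Pre_ admits
def scoresVal (c : Char) : Int :=
  if c = ')' then 1 else if c = ']' then 2 else if c = '}' then 3
  else if c = '>' then 4 else 0

def getCompletionScore (line : String) : Int :=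
  line.toList.foldl (fun score c => score * 5 + scoresVal c) 0

-- ===== PORT B =====
def getCompletionScore_alt (line : String) : Int :=
  (line.toList.reverse.foldl
    (fun (p : Int × Int) c => (p.1 + scoresVal c * p.2, p.2 * 5))
    (0, 1)).1

-- ===== PRECONDITION & SPEC =====
-- Pre_ excludes lines containing a character other than ) ] } >, on which A raises KeyError.
def Pre_getCompletionScore (line : String) : Prop :=
  (line.toList.all (fun c => c == ')' || c == ']' || c == '}' || c == '>')) = true
instance (line : String) : Decidable (Pre_getCompletionScore line) := by
  unfold Pre_getCompletionScore; infer_instance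
def pvWitness_getCompletionScore : String := "])}>"

def Spec_getCompletionScore (line : String) (out : Int) : Prop := out = getCompletionScore_alt line
instance (line : String) (out : Int) : Decidable (Spec_getCompletionScore line out) := by unfold Spec_getCompletionScore; infer_instance

-- ===== CLAIM (what is proved, stated in full; the proofs are below) =====
def Claim_equal_getCompletionScore : Prop := ∀ (line : String), Dom_getCompletionScore line → Pre_getCompletionScore line → Spec_getCompletionScore line (getCompletionScore line)

-- ===== LEMMAS AND PROOFS =====
-- A's Horner fold over m ++ [c]
theorem hornerA_append (m : List Char) (c : Char) (s : Int) :
    (m ++ [c]).foldl (fun score c => score * 5 + scoresVal c) s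
      = (m.foldl (fun score c => score * 5 + scoresVal c) s) * 5
          + scoresVal c := by
  simp [List.foldl_append]

-- B's weighted fold from (s, w) over r equals s + w * Horner of r.reverse
theorem altFold_eq (r : List Char) (s w : Int) :
    (r.foldl (fun (p : Int × Int) c => (p.1 + scoresVal c * p.2, p.2 * 5)) (s, w)).1
      = s + w * (r.reverse.foldl (fun score c => score * 5 + scoresVal c) 0) := by
  induction r generalizing s w with
  | nil => simp
  | cons c r' ih =>
      simp only [List.foldl_cons, List.reverse_cons, ih, hornerA_append]
      ring

theorem getCompletionScore_spec : Claim_equal_getCompletionScore := by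
  intro line _ _
  unfold Spec_getCompletionScore getCompletionScore getCompletionScore_alt
  rw [altFold_eq]
  simp
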